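-- pv_equiv track=rewrite | github.com/AlticeLabsProjects/meocloud-cli | strings/convert_to_native_format.py | string_to_win32
-- ===== SOURCE A (Python) =====
-- def string_to_win32(line):
--     strings_found = 0
--     line_len = len(line)
--     fmt_strs_found = 0
--     newline = ''
--     for i, char in enumerate(line):
--         if char == '%' and i < line_len - 1 and line[i + 1] == 'S':
--             fmt_strs_found += 1
--             newline += '%' + str(fmt_strs_found)
--         elif char == 'S' and i > 0 and line[i - 1] == '%':
--             continue
--         else:
--             newline += char
--     return newline
-- ===== SOURCE B (Python) =====
-- def string_to_win32(line):
--     parts = line.split('%S')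
--     out = [parts[0]]
--     for i, part in enumerate(parts[1:], 1):
--         out.append('%' + str(i) + part)
--     return ''.join(out)
-- ===== Notes on version B (the rewrite author's own statement) =====
-- stated objective: simpler
-- what changed: Replaces the character-by-character state machine (with index lookups at i-1/i+1 and a skip branch) by splitting on the token and reassembling the parts with numbered separators.
import Mathlib
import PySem

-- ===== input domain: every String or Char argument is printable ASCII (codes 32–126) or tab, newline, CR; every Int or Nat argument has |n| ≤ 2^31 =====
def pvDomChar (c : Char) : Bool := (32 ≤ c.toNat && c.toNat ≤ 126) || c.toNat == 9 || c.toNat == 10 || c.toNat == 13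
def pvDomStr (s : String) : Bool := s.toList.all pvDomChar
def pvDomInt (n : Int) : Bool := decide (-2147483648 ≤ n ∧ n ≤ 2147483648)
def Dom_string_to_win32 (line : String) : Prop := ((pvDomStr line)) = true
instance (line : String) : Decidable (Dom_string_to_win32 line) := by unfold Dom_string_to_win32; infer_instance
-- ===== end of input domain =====

-- B replaces A's character-by-character state machine by split-on-'%S' then numbered reassembly; objective: simpler.

-- ===== PORT A =====
-- the loop body of A's 'for i, char in enumerate(line)': state = (fmt_strs_found, newline)
def pvStepA (l : List Char) (st : Int × List Char) (ic : Int × Char) : Int × List Char :=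
  if ic.2 = '%' ∧ ic.1 < (l.length : Int) - 1 ∧ PySem.List.pyGet? l (ic.1 + 1) = some 'S' then
    (st.1 + 1, st.2 ++ '%' :: (PySem.Int.toStr (st.1 + 1)).toList)
  else if ic.2 = 'S' ∧ ic.1 > 0 ∧ PySem.List.pyGet? l (ic.1 - 1) = some '%' then st
  else (st.1, st.2 ++ [ic.2])

def string_to_win32 (line : String) : String :=
  String.ofList (((PySem.List.enumerate line.toList 0).foldl (pvStepA line.toList) (0, [])).2)

-- ===== PORT B =====
-- line.split('%S') on the character list (leftmost, non-overlapping matches, like str.split)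
def pvSplitPS : List Char → List (List Char)
  | [] => [[]]
  | [c] => [[c]]
  | c :: d :: rest =>
      if c = '%' ∧ d = 'S' then [] :: pvSplitPS rest
      else match pvSplitPS (d :: rest) with
        | p :: ps => (c :: p) :: ps
        | [] => [[c]]

-- the "for i, part in enumerate(parts[1:], 1): out.append('%' + str(i) + part)" joining pass
def pvJoinNum : Int → List (List Char) → List Char
  | _, [] => []
  | i, p :: ps => ('%' :: (PySem.Int.toStr i).toList ++ p) ++ pvJoinNum (i + 1) ps

def string_to_win32_alt (line : String) : String :=
  match pvSplitPS line.toList with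
  | [] => ""          -- unreachable: split never returns an empty list
  | p :: ps => String.ofList (p ++ pvJoinNum 1 ps)

-- ===== PRECONDITION & SPEC =====
def Spec_string_to_win32 (line : String) (out : String) : Prop := out = string_to_win32_alt line
instance (line : String) (out : String) : Decidable (Spec_string_to_win32 line out) := by unfold Spec_string_to_win32; infer_instance

-- ===== CLAIM (what is proved, stated in full; the proofs are below) =====
def Claim_equal_string_to_win32 : Prop := ∀ (line : String), Dom_string_to_win32 line → Spec_string_to_win32 line (string_to_win32 line)

-- ===== LEMMAS AND PROOFS =====

-- common characterisation: replace each '%S' (leftmost, non-overlapping) by '%' + str(counter)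
def pvG : Int → List Char → List Char
  | _, [] => []
  | _, [c] => [c]
  | k, c :: d :: rest =>
      if c = '%' ∧ d = 'S' then '%' :: (PySem.Int.toStr (k + 1)).toList ++ pvG (k + 1) rest
      else c :: pvG k (d :: rest)

lemma pvSplitPS_ne_nil (l : List Char) : pvSplitPS l ≠ [] := by
  induction l using pvSplitPS.induct with
  | case1 => simp [pvSplitPS]
  | case2 c => simp [pvSplitPS]
  | case3 c d rest h ih => simp [pvSplitPS, h]
  | case4 c d rest h p ps heq ih => rw [pvSplitPS, if_neg h, heq]; simp
  | case5 c d rest h heq ih => exact absurd heq ih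

lemma pvSplitPS_join (l : List Char) : ∀ (k : Int) (p : List Char) (ps : List (List Char)),
    pvSplitPS l = p :: ps → p ++ pvJoinNum (k + 1) ps = pvG k l := by
  induction l using pvSplitPS.induct with
  | case1 =>
      intro k p ps h
      simp [pvSplitPS] at h
      simp [h.1, h.2, pvJoinNum, pvG]
  | case2 c =>
      intro k p ps h
      simp [pvSplitPS] at h
      simp [h.1, h.2, pvJoinNum, pvG]
  | case3 c d rest h ih =>
      intro k p ps hsp
      rw [pvSplitPS, if_pos h] at hsp
      injection hsp with h1 h2
      rcases hsp' : pvSplitPS rest with _ | ⟨p', ps'⟩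
      · exact absurd hsp' (pvSplitPS_ne_nil rest)
      · subst h1; rw [← h2, hsp']
        rw [pvG, if_pos h]
        have := ih (k + 1) p' ps' hsp'
        simp only [pvJoinNum, List.nil_append, List.append_assoc] at *
        rw [this]
  | case4 c d rest h p' ps' heq ih =>
      intro k p ps hsp
      rw [pvSplitPS, if_neg h, heq] at hsp
      injection hsp with h1 h2
      subst h1 h2
      rw [pvG, if_neg h, ← ih k p' ps' heq]
      simp
  | case5 c d rest h heq ih => exact absurd heq (pvSplitPS_ne_nil _)

-- the "elif char == 'S' and i > 0 and line[i-1] == '%'" branch never fires when the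
-- character before the current suffix is not the '%' of a token
lemma pvSkipOff (pre suf : List Char) (c : Char)
    (hprev : pre.getLast? = some '%' → c ≠ 'S') :
    ¬ (c = 'S' ∧ ((pre.length : Int) > 0) ∧
        PySem.List.pyGet? (pre ++ suf) ((pre.length : Int) - 1) = some '%') := by
  rintro ⟨hc, hpos, hget⟩
  rcases List.eq_nil_or_concat pre with h | ⟨p0, a, h⟩
  · rw [h] at hpos; simp at hpos
  · rw [List.concat_eq_append] at h
    subst h
    rw [show (((p0 ++ [a]).length : Int) - 1) = (p0.length : Int) by simp,
        List.append_assoc, List.singleton_append,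
        PySem.List.pyGet?_append_length p0 suf a] at hget
    injection hget with hget
    subst hget
    exact hprev (by simp) hc

-- one-step evaluations of the loop body
lemma pvStepA_token (l : List Char) (st : Int × List Char) (i : Int)
    (hlt : i < (l.length : Int) - 1) (hget : PySem.List.pyGet? l (i + 1) = some 'S') :
    pvStepA l st (i, '%') = (st.1 + 1, st.2 ++ '%' :: (PySem.Int.toStr (st.1 + 1)).toList) := by
  simp [pvStepA, hlt, hget]

lemma pvStepA_skip (l : List Char) (st : Int × List Char) (i : Int)
    (hpos : i > 0) (hget : PySem.List.pyGet? l (i - 1) = some '%') :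
    pvStepA l st (i, 'S') = st := by
  simp [pvStepA, hpos, hget]

lemma pvStepA_plain (l : List Char) (st : Int × List Char) (i : Int) (c : Char)
    (h1 : ¬(c = '%' ∧ i < (l.length : Int) - 1 ∧ PySem.List.pyGet? l (i + 1) = some 'S'))
    (h2 : ¬(c = 'S' ∧ i > 0 ∧ PySem.List.pyGet? l (i - 1) = some '%')) :
    pvStepA l st (i, c) = (st.1, st.2 ++ [c]) := by
  rw [pvStepA, if_neg h1, if_neg h2]

lemma scanA (k : Int) (suf : List Char) : ∀ (pre : List Char) (acc : List Char),
    (pre.getLast? = some '%' → suf.head? ≠ some 'S') →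
    ((PySem.List.enumerate suf (pre.length : Int)).foldl (pvStepA (pre ++ suf)) (k, acc)).2
      = acc ++ pvG k suf := by
  induction k, suf using pvG.induct with
  | case1 k =>
      intro pre acc _
      simp [PySem.List.enumerate_nil, pvG]
  | case2 k c =>
      intro pre acc hprev
      rw [PySem.List.enumerate_cons, PySem.List.enumerate_nil, List.foldl_cons, List.foldl_nil,
          pvStepA_plain _ _ _ _
            (by rintro ⟨_, hlt, _⟩; simp at hlt)
            (pvSkipOff pre [c] c (fun hl hcS => hprev hl (by simp [hcS])))]
      simp [pvG]
  | case3 k c d rest h ih =>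
      intro pre acc hprev
      obtain ⟨hc, hd⟩ := h
      subst hc hd
      rw [PySem.List.enumerate_cons, PySem.List.enumerate_cons, List.foldl_cons,
          pvStepA_token (pre ++ '%' :: 'S' :: rest) (k, acc) (pre.length : Int)
            (by have hlen : (pre ++ '%' :: 'S' :: rest).length = pre.length + (rest.length + 2) := by
                  simp
                rw [hlen]; push_cast; omega)
            (by rw [show (pre ++ '%' :: 'S' :: rest) = (pre ++ ['%']) ++ 'S' :: rest by simp,
                    show ((pre.length : Int) + 1) = (((pre ++ ['%']).length : Int)) by simp]
                exact PySem.List.pyGet?_append_length _ _ _),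
          List.foldl_cons,
          pvStepA_skip (pre ++ '%' :: 'S' :: rest) _ ((pre.length : Int) + 1)
            (by omega)
            (by rw [show ((pre.length : Int) + 1 - 1) = (pre.length : Int) by ring]
                exact PySem.List.pyGet?_append_length _ _ _)]
      rw [show (pre ++ '%' :: 'S' :: rest) = (pre ++ ['%', 'S']) ++ rest by simp,
          show ((pre.length : Int) + 1 + 1) = (((pre ++ ['%', 'S']).length : Int)) by simp; ring]
      rw [ih (pre ++ ['%', 'S']) (acc ++ '%' :: (PySem.Int.toStr (k + 1)).toList)
            (fun hl => by simp at hl)]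
      rw [pvG, if_pos ⟨rfl, rfl⟩]
      simp
  | case4 k c d rest h ih =>
      intro pre acc hprev
      rw [PySem.List.enumerate_cons, List.foldl_cons,
          pvStepA_plain (pre ++ c :: d :: rest) (k, acc) (pre.length : Int) c
            (by rintro ⟨hc, _, hget⟩
                rw [show (pre ++ c :: d :: rest) = (pre ++ [c]) ++ d :: rest by simp,
                    show ((pre.length : Int) + 1) = (((pre ++ [c]).length : Int)) by simp,
                    PySem.List.pyGet?_append_length] at hget
                injection hget with hget
                exact h ⟨hc, hget⟩)
            (pvSkipOff pre (c :: d :: rest) c (fun hl hcS => hprev hl (by simp [hcS])))]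
      rw [show (pre ++ c :: d :: rest) = (pre ++ [c]) ++ d :: rest by simp,
          show ((pre.length : Int) + 1) = (((pre ++ [c]).length : Int)) by simp]
      rw [ih (pre ++ [c]) (acc ++ [c]) (fun hl hh => by
            simp at hl hh
            exact h ⟨hl, hh⟩)]
      rw [pvG, if_neg h]
      simp

-- ===== VERDICT (by name: the statement is the Claim_ definition above) =====
theorem string_to_win32_spec : Claim_equal_string_to_win32 := by
  intro line _
  unfold Spec_string_to_win32 string_to_win32 string_to_win32_alt
  have hA := scanA 0 line.toList [] [] (by simp)
  simp only [List.length_nil, Int.natCast_zero, List.nil_append] at hA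
  rw [hA]
  rcases hsp : pvSplitPS line.toList with _ | ⟨p, ps⟩
  · exact absurd hsp (pvSplitPS_ne_nil _)
  · have := pvSplitPS_join line.toList 0 p ps hsp
    simp only [zero_add] at this
    show String.ofList (pvG 0 line.toList) = String.ofList (p ++ pvJoinNum 1 ps)
    rw [this]
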